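-- pv_equiv track=rewrite | github.com/BusraBulut222/Cell-Lineage-EPFL | Functions.py | len_2et_1
-- ===== SOURCE A (Python) =====
-- def len_2et_1(p):
--     c1=0
--     c2=0
--     for i in range(len(p)):
--         if (len(p[i])==2):
--             c2+=1
--         elif len(p[i])==1:
--             c1+=1
--     if c2==len(p)-1 and c1==1:
--         return True
--     return False
-- ===== SOURCE B (Python) =====
-- def len_2et_1(p):
--     return sorted(len(x) for x in p) == [1] + [2] * (len(p) - 1)
-- ===== Notes on version B (the rewrite author's own statement) =====
-- stated objective: simpler
-- what changed: Replaces the two-counter index loop with arithmetic checks by a one-liner that sorts the element lengths and compares them to the canonical template [1] + [2]*(len(p)-1).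
import Mathlib
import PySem

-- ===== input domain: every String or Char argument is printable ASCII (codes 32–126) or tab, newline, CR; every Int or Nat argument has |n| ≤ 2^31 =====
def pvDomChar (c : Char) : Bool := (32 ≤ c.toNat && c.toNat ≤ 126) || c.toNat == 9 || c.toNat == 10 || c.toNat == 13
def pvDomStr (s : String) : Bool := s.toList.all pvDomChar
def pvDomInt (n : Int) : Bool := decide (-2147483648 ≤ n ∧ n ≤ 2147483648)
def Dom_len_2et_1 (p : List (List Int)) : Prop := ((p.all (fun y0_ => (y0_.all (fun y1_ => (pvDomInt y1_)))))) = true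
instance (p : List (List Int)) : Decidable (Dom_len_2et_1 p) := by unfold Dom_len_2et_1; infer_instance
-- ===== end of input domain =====

-- B replaces A's two-counter index loop by sorting the element lengths and comparing
-- them to the template [1] + [2]*(len(p)-1); objective: simpler.

-- ===== PORT A =====
-- loop body of A's for-loop (the two-counter update), kept as a named helper
def pvStep (s : Int × Int) (x : List Int) : Int × Int :=
  if PySem.List.len x == 2 then (s.1, s.2 + 1)
  else if PySem.List.len x == 1 then (s.1 + 1, s.2)
  else s

def len_2et_1 (p : List (List Int)) : Bool :=
  let r := (PySem.List.pyRange 0 (PySem.List.len p) 1).foldl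
      (fun s i => pvStep s (PySem.List.pyGetD p i [])) ((0 : Int), (0 : Int))
  if r.2 == PySem.List.len p - 1 && r.1 == 1 then true else false

-- ===== PORT B =====
def len_2et_1_alt (p : List (List Int)) : Bool :=
  PySem.List.sorted (p.map (fun x => PySem.List.len x)) (fun v => v) false
    == (1 : Int) :: List.replicate (p.length - 1) (2 : Int)

-- ===== PRECONDITION & SPEC =====
def Spec_len_2et_1 (p : List (List Int)) (out : Bool) : Prop := out = len_2et_1_alt p
instance (p : List (List Int)) (out : Bool) : Decidable (Spec_len_2et_1 p out) := by unfold Spec_len_2et_1; infer_instance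

-- ===== CLAIM (what is proved, stated in full; the proofs are below) =====
def Claim_equal_len_2et_1 : Prop := ∀ (p : List (List Int)), Dom_len_2et_1 p → Spec_len_2et_1 p (len_2et_1 p)

-- ===== LEMMAS AND PROOFS =====

-- A's loop accumulates the counts of length-1 and length-2 elements.
theorem pvFoldCounts (p : List (List Int)) (a b : Int) :
    p.foldl pvStep (a, b)
    = (a + (p.countP (fun x => x.length == 1) : Int),
       b + (p.countP (fun x => x.length == 2) : Int)) := by
  induction p generalizing a b with
  | nil => simp
  | cons x xs ih =>
    rw [List.foldl_cons]
    by_cases h2 : x.length = 2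
    · have e : pvStep (a, b) x = (a, b + 1) := by simp [pvStep, PySem.List.len, h2]
      rw [e, ih]
      simp [h2]
      ring
    · by_cases h1 : x.length = 1
      · have e : pvStep (a, b) x = (a + 1, b) := by
          simp [pvStep, PySem.List.len, h1]
        rw [e, ih]
        simp [h1]
        ring
      · have c2 : ((x.length : Int) ≠ 2) := by omega
        have c1 : ((x.length : Int) ≠ 1) := by omega
        have e : pvStep (a, b) x = (a, b) := by
          simp [pvStep, PySem.List.len, c1, c2]
        rw [e, ih]
        simp [h1, h2]

-- the counts of two distinct values never exceed the length
theorem pvCountsLe (l : List Int) : l.count 1 + l.count 2 ≤ l.length := by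
  induction l with
  | nil => simp
  | cons a t ih =>
    simp only [List.count_cons, List.length_cons]
    by_cases h1 : a = 1 <;> by_cases h2 : a = 2 <;>
      simp_all <;> omega

-- members of a list whose 1-count plus 2-count exhausts the length are 1 or 2
theorem pvAllOneTwo (l : List Int) (h : l.count 1 + l.count 2 = l.length) :
    ∀ x ∈ l, x = 1 ∨ x = 2 := by
  induction l with
  | nil => simp
  | cons a t ih =>
    intro x hx
    rcases List.mem_cons.mp hx with rfl | hx
    · by_contra hc
      rw [not_or] at hc
      obtain ⟨hx1, hx2⟩ := hc
      have hle := pvCountsLe t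
      simp only [List.count_cons, List.length_cons] at h
      simp [hx1, hx2] at h
      omega
    · apply ih _ _ hx
      have hle := pvCountsLe t
      simp only [List.count_cons, List.length_cons] at h
      by_cases h1 : a = 1 <;> by_cases h2 : a = 2 <;> simp_all <;> omega

-- the count conditions characterise being a permutation of the template
theorem pvPermIff (l : List Int) :
    (l.count 1 = 1 ∧ (l.count 2 : Int) = (l.length : Int) - 1) ↔
      l.Perm ((1 : Int) :: List.replicate (l.length - 1) (2 : Int)) := by
  constructor
  · rintro ⟨h1, h2⟩
    have hlen : 1 ≤ l.length := by
      by_contra h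
      have : l.length = 0 := by omega
      have : l.count 2 = 0 := by
        rw [List.count_eq_zero]
        intro hm; exact absurd (List.length_pos_of_mem hm) (by omega)
      omega
    have h2' : l.count 2 = l.length - 1 := by omega
    rw [List.perm_iff_count]
    intro a
    by_cases ha1 : a = 1
    · subst ha1
      simp [List.count_replicate, h1]
    · by_cases ha2 : a = 2
      · subst ha2
        simp [h2']
      · have hnot : a ∉ l := by
          intro hm
          rcases pvAllOneTwo l (by omega) a hm with rfl | rfl
          · exact ha1 rfl
          · exact ha2 rfl
        rw [List.count_eq_zero.mpr hnot]
        simp [List.count_replicate, Ne.symm ha1, Ne.symm ha2]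
  · intro hp
    have hlen := hp.length_eq
    simp at hlen
    have hge : 1 ≤ l.length := by omega
    have h1 : l.count 1 = 1 := by
      rw [hp.count_eq]
      simp [List.count_replicate]
    have h2 : l.count 2 = l.length - 1 := by
      rw [hp.count_eq]
      simp
    exact ⟨h1, by omega⟩

-- the template is already sorted
theorem pvTemplateSorted (k : Nat) :
    PySem.List.sorted ((1 : Int) :: List.replicate k (2 : Int)) (fun v => v) false
      = (1 : Int) :: List.replicate k (2 : Int) := by
  apply PySem.List.sorted_eq_self_of_pairwise
  rw [List.pairwise_cons]
  constructor
  · intro a ha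
    rw [List.eq_of_mem_replicate ha]; norm_num
  · exact List.pairwise_replicate.mpr (Or.inr (by norm_num))

-- ===== VERDICT (by name: the statement is the Claim_ definition above) =====
theorem len_2et_1_spec : Claim_equal_len_2et_1 := by
  intro p _
  unfold Spec_len_2et_1
  simp only [len_2et_1, len_2et_1_alt, PySem.List.len_eq,
    PySem.List.foldl_pyRange_zero_pyGetD', pvFoldCounts]
  have hite : ∀ c : Bool, (if c = true then true else false) = c := fun c => by cases c <;> simp
  rw [hite]
  set ls : List Int := p.map (fun x => (x.length : Int)) with hls
  have hcount1 : p.countP (fun x => x.length == 1) = ls.count 1 := by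
    rw [hls, List.count_eq_countP, List.countP_map]
    apply List.countP_congr
    intro x _
    rw [Bool.eq_iff_iff]
    simp [Function.comp]
  have hcount2 : p.countP (fun x => x.length == 2) = ls.count 2 := by
    rw [hls, List.count_eq_countP, List.countP_map]
    apply List.countP_congr
    intro x _
    rw [Bool.eq_iff_iff]
    simp [Function.comp]
    omega
  have hlslen : ls.length = p.length := by simp [hls]
  rw [Bool.eq_iff_iff]
  constructor
  · intro h
    simp only [Bool.and_eq_true, beq_iff_eq, zero_add] at h
    obtain ⟨hc2, hc1⟩ := h
    have hperm : ls.Perm ((1 : Int) :: List.replicate (ls.length - 1) (2 : Int)) := by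
      apply (pvPermIff ls).mp
      constructor
      · rw [← hcount1]; exact_mod_cast hc1
      · rw [← hcount2]; rw [hlslen]; omega
    rw [beq_iff_eq, ← hlslen]
    calc PySem.List.sorted ls (fun v => v) false
        = PySem.List.sorted ((1 : Int) :: List.replicate (ls.length - 1) (2 : Int)) (fun v => v) false :=
          PySem.List.sorted_eq_sorted_of_perm _ _ _ (fun _ _ h => h) hperm
      _ = (1 : Int) :: List.replicate (ls.length - 1) (2 : Int) := pvTemplateSorted _
  · intro h
    rw [beq_iff_eq, ← hlslen] at h
    have hperm : ls.Perm ((1 : Int) :: List.replicate (ls.length - 1) (2 : Int)) := by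
      calc ls.Perm (PySem.List.sorted ls (fun v => v) false) := (PySem.List.sorted_perm _ _ _).symm
        _ = _ := h
    obtain ⟨h1, h2⟩ := (pvPermIff ls).mpr hperm
    simp only [Bool.and_eq_true, beq_iff_eq, zero_add]
    constructor
    · rw [hcount2]; rw [hlslen] at h2; omega
    · rw [hcount1]; exact_mod_cast h1
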